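-- pv_equiv track=rewrite | github.com/yanzhost45/auto | handler/deposit_user.py | inject_or_replace_amount
-- ===== SOURCE A (Python) =====
-- from typing import Optional, List, Tuple, Dict, Any, Union
--
-- def parse_tlv(payload: str) -> Optional[List[Tuple[str, str]]]:
--     i = 0
--     L = len(payload)
--     out: List[Tuple[str, str]] = []
--     try:
--         while i < L:
--             if i + 4 > L:
--                 return None
--             tag = payload[i : i + 2]; i += 2
--             length = int(payload[i : i + 2]); i += 2
--             if i + length > L:
--                 return None
--             value = payload[i : i + length]; i += length
--             out.append((tag, value))
--         return out
--     except Exception: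
--         return None
--
-- def build_tlv(entries: List[Tuple[str, str]]) -> str:
--     parts: List[str] = []
--     for tag, val in entries:
--         parts.append(f"{tag}{len(val):02d}{val}")
--     return "".join(parts)
--
-- def inject_or_replace_amount(payload: str, amount_str: str) -> str:
--     """
--     Legacy TLV-aware injection (keeps structure when parsing is possible).
--     Kept as fallback if make_qris_dynamic isn't available.
--     """
--     entries = parse_tlv(payload)
--     if entries is None:
--         return payload + f"54{len(amount_str):02d}{amount_str}"
--
--     found = False
--     new_entries: List[Tuple[str, str]] = []
--     for tag, val in entries:
--         if tag == "54":
--             new_entries.append(("54", amount_str))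
--             found = True
--         else:
--             new_entries.append((tag, val))
--
--     if not found:
--         inserted = False
--         out: List[Tuple[str, str]] = []
--         for tag, val in new_entries:
--             out.append((tag, val))
--             if tag == "53" and not inserted:
--                 out.append(("54", amount_str))
--                 inserted = True
--         if not inserted:
--             out = []
--             for tag, val in new_entries:
--                 if tag == "58" and not inserted:
--                     out.append(("54", amount_str))
--                     inserted = True
--                 out.append((tag, val))
--         if not inserted:
--             out.append(("54", amount_str))
--         new_entries = out
--
--     return build_tlv(new_entries)
-- ===== SOURCE B (Python) =====
-- from typing import Optional, List, Tuple
--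
-- def parse_tlv(payload: str) -> Optional[List[Tuple[str, str]]]:
--     i = 0
--     L = len(payload)
--     out: List[Tuple[str, str]] = []
--     try:
--         while i < L:
--             if i + 4 > L:
--                 return None
--             tag = payload[i : i + 2]; i += 2
--             length = int(payload[i : i + 2]); i += 2
--             if i + length > L:
--                 return None
--             value = payload[i : i + length]; i += length
--             out.append((tag, value))
--         return out
--     except Exception:
--         return None
--
-- def inject_or_replace_amount(payload: str, amount_str: str) -> str:
--     entries = parse_tlv(payload)
--     chunk = f"54{len(amount_str):02d}{amount_str}"
--     if entries is None:
--         return payload + chunk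
--
--     tags = {t for t, _ in entries}
--     if "54" in tags:
--         mode = 0          # replace every '54' value
--     elif "53" in tags:
--         mode = 1          # insert chunk after the first '53'
--     elif "58" in tags:
--         mode = 2          # insert chunk before the first '58'
--     else:
--         mode = 3          # append chunk at the end
--
--     def emit(es: List[Tuple[str, str]], pending: bool) -> str:
--         if not es:
--             return chunk if pending else ""
--         (t, v), rest = es[0], es[1:]
--         field = f"{t}{len(v):02d}{v}"
--         if mode == 0 and t == "54":
--             return chunk + emit(rest, False)
--         if pending and mode == 1 and t == "53":
--             return field + chunk + emit(rest, False)
--         if pending and mode == 2 and t == "58":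
--             return chunk + field + emit(rest, False)
--         return field + emit(rest, pending)
--
--     return emit(entries, mode != 0)
-- ===== Notes on version B (the rewrite author's own statement) =====
-- stated objective: alternative
-- what changed: A rebuilds intermediate entry lists with three flag-carrying loops and then serialises with build_tlv; B never builds a modified list: it computes one of four modes (replace/after-53/before-58/append) from a set of tags, then emits the output TLV string directly in a single recursive pass with a 'pending' accumulator, with no build_tlv call, no list.insert and no intermediate rebuilt lists.
import Mathlib
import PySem

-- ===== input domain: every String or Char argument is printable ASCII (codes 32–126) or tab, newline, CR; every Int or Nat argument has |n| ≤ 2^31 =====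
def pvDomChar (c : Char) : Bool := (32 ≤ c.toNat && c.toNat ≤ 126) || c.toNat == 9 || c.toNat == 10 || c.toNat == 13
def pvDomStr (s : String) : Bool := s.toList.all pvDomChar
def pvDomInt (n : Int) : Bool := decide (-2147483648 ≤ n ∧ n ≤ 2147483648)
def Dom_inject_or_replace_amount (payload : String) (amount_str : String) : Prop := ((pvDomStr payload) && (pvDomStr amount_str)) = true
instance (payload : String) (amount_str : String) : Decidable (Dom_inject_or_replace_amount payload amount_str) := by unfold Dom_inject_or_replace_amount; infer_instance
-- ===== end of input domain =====

-- B replaces A's three flag-carrying list-rebuild loops + build_tlv by a mode selection over the set of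
-- tags followed by ONE recursive pass emitting the output string directly; objective: alternative.

-- ===== PORT A =====
-- f"{n:02d}"
def pvTwoDigit (n : Int) : List Char :=
  let s := PySem.Int.toChars n
  if s.length < 2 then '0' :: s else s

-- f"54{len(amount_str):02d}{amount_str}"
def pvAmountTag (amount_str : String) : List Char :=
  '5' :: '4' :: pvTwoDigit (amount_str.toList.length : Int) ++ amount_str.toList

-- parse_tlv's while loop; fuel is only a totality guard: each iteration advances i by
-- 4 + length, so payload.length + 1 iterations suffice whenever every parsed length is ≥ 0
def parseTLVgo (cs : List Char) : Nat → Int → List (String × String) → Option (List (String × String))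
  | 0, _, _ => none
  | fuel+1, i, out =>
    if i < (cs.length : Int) then
      if i + 4 > (cs.length : Int) then none
      else
        let tag := PySem.List.slice cs (some i) (some (i+2))
        let i := i + 2
        match PySem.Int.ofChars? (PySem.List.slice cs (some i) (some (i+2))) with
        | none => none   -- int() raised ValueError → caught, parse_tlv returns None
        | some len =>
          let i := i + 2
          if i + len > (cs.length : Int) then none
          else
            let value := PySem.List.slice cs (some i) (some (i+len))
            parseTLVgo cs fuel (i + len) (out ++ [(String.ofList tag, String.ofList value)])
    else some out

def parseTLV (payload : String) : Option (List (String × String)) :=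
  parseTLVgo payload.toList (payload.toList.length + 1) 0 []

def buildTLV (entries : List (String × String)) : String :=
  String.ofList ((entries.foldl
    (fun (parts : List (List Char)) tv =>
      parts ++ [tv.1.toList ++ pvTwoDigit (tv.2.toList.length : Int) ++ tv.2.toList]) []).flatten)

def inject_or_replace_amount (payload : String) (amount_str : String) : String :=
  match parseTLV payload with
  | none => String.ofList (payload.toList ++ pvAmountTag amount_str)
  | some entries =>
    let p := entries.foldl
      (fun (acc : List (String × String) × Bool) tv =>
        if tv.1 == "54" then (acc.1 ++ [("54", amount_str)], true) else (acc.1 ++ [tv], acc.2))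
      ([], false)
    let new_entries := p.1
    let found := p.2
    let new_entries :=
      if !found then
        let q := new_entries.foldl
          (fun (acc : List (String × String) × Bool) tv =>
            if tv.1 == "53" && !acc.2 then (acc.1 ++ [tv] ++ [("54", amount_str)], true)
            else (acc.1 ++ [tv], acc.2))
          ([], false)
        let r :=
          if !q.2 then
            new_entries.foldl
              (fun (acc : List (String × String) × Bool) tv =>
                if tv.1 == "58" && !acc.2 then (acc.1 ++ [("54", amount_str), tv], true)
                else (acc.1 ++ [tv], acc.2))
              ([], false)
          else q
        if !r.2 then r.1 ++ [("54", amount_str)] else r.1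
      else new_entries
    buildTLV new_entries

-- ===== PORT B =====
-- f"{t}{len(v):02d}{v}"
def pvFmt (tv : String × String) : List Char :=
  tv.1.toList ++ pvTwoDigit (tv.2.toList.length : Int) ++ tv.2.toList

-- B's single recursive emitter (Source B's `emit`)
def emitGo (chunk : List Char) (mode : Nat) : List (String × String) → Bool → List Char
  | [], pending => if pending then chunk else []
  | tv :: rest, pending =>
    if mode == 0 && tv.1 == "54" then chunk ++ emitGo chunk mode rest false
    else if pending && mode == 1 && tv.1 == "53" then pvFmt tv ++ chunk ++ emitGo chunk mode rest false
    else if pending && mode == 2 && tv.1 == "58" then chunk ++ pvFmt tv ++ emitGo chunk mode rest false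
    else pvFmt tv ++ emitGo chunk mode rest pending

def inject_or_replace_amount_alt (payload : String) (amount_str : String) : String :=
  match parseTLV payload with
  | none => String.ofList (payload.toList ++ pvAmountTag amount_str)
  | some entries =>
    let chunk := pvAmountTag amount_str
    let tags : PySem.Set String := PySem.Set.ofList (entries.map Prod.fst)
    let mode : Nat :=
      if PySem.Set.contains tags "54" then 0
      else if PySem.Set.contains tags "53" then 1
      else if PySem.Set.contains tags "58" then 2
      else 3
    String.ofList (emitGo chunk mode entries (mode != 0))

-- ===== PRECONDITION & SPEC =====
def Spec_inject_or_replace_amount (payload : String) (amount_str : String) (out : String) : Prop := out = inject_or_replace_amount_alt payload amount_str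
instance (payload : String) (amount_str : String) (out : String) : Decidable (Spec_inject_or_replace_amount payload amount_str out) := by unfold Spec_inject_or_replace_amount; infer_instance

-- ===== CLAIM =====
def Claim_equal_inject_or_replace_amount : Prop := ∀ (payload : String) (amount_str : String), Dom_inject_or_replace_amount payload amount_str → Spec_inject_or_replace_amount payload amount_str (inject_or_replace_amount payload amount_str)

-- ===== LEMMAS AND PROOFS =====

theorem pvFmt54 (amt : String) : pvFmt ("54", amt) = pvAmountTag amt := by
  simp [pvFmt, pvAmountTag]

-- build_tlv's loop = map + flatten
theorem pv_buildGo (l : List (String × String)) (acc : List (List Char)) :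
    l.foldl
      (fun (parts : List (List Char)) tv =>
        parts ++ [tv.1.toList ++ pvTwoDigit (tv.2.toList.length : Int) ++ tv.2.toList]) acc
    = acc ++ l.map pvFmt := by
  induction l generalizing acc with
  | nil => simp
  | cons x xs ih => rw [List.foldl_cons, ih]; simp [pvFmt]

theorem pv_buildTLV_eq (l : List (String × String)) :
    buildTLV l = String.ofList ((l.map pvFmt).flatten) := by
  unfold buildTLV; rw [pv_buildGo]; simp

-- A's first loop = map + any
theorem pv_loop54 (amt : String) (l : List (String × String)) (acc : List (String × String)) (b : Bool) :
    l.foldl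
      (fun (acc : List (String × String) × Bool) tv =>
        if tv.1 == "54" then (acc.1 ++ [("54", amt)], true) else (acc.1 ++ [tv], acc.2))
      (acc, b)
    = (acc ++ l.map (fun tv => if tv.1 == "54" then ("54", amt) else tv),
       b || l.any (fun tv => tv.1 == "54")) := by
  induction l generalizing acc b with
  | nil => simp
  | cons x xs ih =>
    rw [List.foldl_cons, List.map_cons, List.any_cons]
    by_cases h : (x.1 == "54") = true
    · show List.foldl _ (if (x.1 == "54") = true then _ else _) xs = _
      rw [if_pos h, ih, if_pos h]; simp [h]
    · show List.foldl _ (if (x.1 == "54") = true then _ else _) xs = _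
      rw [if_neg h, ih, if_neg h]
      rw [Bool.not_eq_true] at h; simp [h]

theorem pv_map_id_of_no54 (amt : String) (l : List (String × String))
    (h : l.any (fun tv => tv.1 == "54") = false) :
    l.map (fun tv => if tv.1 == "54" then ("54", amt) else tv) = l := by
  induction l with
  | nil => rfl
  | cons x xs ih =>
    simp only [List.any_cons, Bool.or_eq_false_iff] at h
    rw [List.map_cons, if_neg (by simp [h.1]), ih h.2]

-- A's 53-loop once the flag is set: it only copies
theorem pv_loop53_done (amt : String) (l : List (String × String)) (acc : List (String × String)) :
    l.foldl
      (fun (acc : List (String × String) × Bool) tv =>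
        if tv.1 == "53" && !acc.2 then (acc.1 ++ [tv] ++ [("54", amt)], true)
        else (acc.1 ++ [tv], acc.2))
      (acc, true)
    = (acc ++ l, true) := by
  induction l generalizing acc with
  | nil => simp
  | cons x xs ih =>
    rw [List.foldl_cons]
    show List.foldl _ (if (x.1 == "53" && !true) = true then _ else _) xs = _
    rw [if_neg (by simp), ih]; simp

-- A's 53-loop = insert after the first "53"
theorem pv_loop53 (amt : String) (l : List (String × String)) (acc : List (String × String)) :
    l.foldl
      (fun (acc : List (String × String) × Bool) tv =>
        if tv.1 == "53" && !acc.2 then (acc.1 ++ [tv] ++ [("54", amt)], true)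
        else (acc.1 ++ [tv], acc.2))
      (acc, false)
    = match l.findIdx? (fun tv => tv.1 == "53") with
      | some i => (acc ++ l.take (i+1) ++ ("54", amt) :: l.drop (i+1), true)
      | none => (acc ++ l, false) := by
  induction l generalizing acc with
  | nil => simp
  | cons x xs ih =>
    rw [List.foldl_cons, List.findIdx?_cons]
    by_cases h : (x.1 == "53") = true
    · show List.foldl _ (if (x.1 == "53" && !false) = true then _ else _) xs = _
      rw [if_pos (by simp [h]), pv_loop53_done, if_pos h]; simp
    · show List.foldl _ (if (x.1 == "53" && !false) = true then _ else _) xs = _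
      rw [if_neg (by simp [h]), ih, if_neg h]
      cases hfi : xs.findIdx? (fun tv => tv.1 == "53") with
      | none => simp
      | some i => simp [List.take_succ_cons, List.drop_succ_cons]

-- A's 58-loop once the flag is set
theorem pv_loop58_done (amt : String) (l : List (String × String)) (acc : List (String × String)) :
    l.foldl
      (fun (acc : List (String × String) × Bool) tv =>
        if tv.1 == "58" && !acc.2 then (acc.1 ++ [("54", amt), tv], true)
        else (acc.1 ++ [tv], acc.2))
      (acc, true)
    = (acc ++ l, true) := by
  induction l generalizing acc with
  | nil => simp
  | cons x xs ih =>
    rw [List.foldl_cons]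
    show List.foldl _ (if (x.1 == "58" && !true) = true then _ else _) xs = _
    rw [if_neg (by simp), ih]; simp

-- A's 58-loop = insert before the first "58"
theorem pv_loop58 (amt : String) (l : List (String × String)) (acc : List (String × String)) :
    l.foldl
      (fun (acc : List (String × String) × Bool) tv =>
        if tv.1 == "58" && !acc.2 then (acc.1 ++ [("54", amt), tv], true)
        else (acc.1 ++ [tv], acc.2))
      (acc, false)
    = match l.findIdx? (fun tv => tv.1 == "58") with
      | some i => (acc ++ l.take i ++ ("54", amt) :: l.drop i, true)
      | none => (acc ++ l, false) := by
  induction l generalizing acc with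
  | nil => simp
  | cons x xs ih =>
    rw [List.foldl_cons, List.findIdx?_cons]
    by_cases h : (x.1 == "58") = true
    · show List.foldl _ (if (x.1 == "58" && !false) = true then _ else _) xs = _
      rw [if_pos (by simp [h]), pv_loop58_done, if_pos h]; simp
    · show List.foldl _ (if (x.1 == "58" && !false) = true then _ else _) xs = _
      rw [if_neg (by simp [h]), ih, if_neg h]
      cases hfi : xs.findIdx? (fun tv => tv.1 == "58") with
      | none => simp
      | some i => simp [List.take_succ_cons, List.drop_succ_cons]

-- tag-set membership ↔ any on first components
theorem pv_contains_iff (l : List (String × String)) (t : String) :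
    PySem.Set.contains (PySem.Set.ofList (l.map Prod.fst)) t
      = l.any (fun tv => tv.1 == t) := by
  rcases h : l.any (fun tv => tv.1 == t) with _ | _
  · rw [Bool.eq_false_iff]
    intro hc
    have hmem := (PySem.Set.mem_ofList _ _).mp ((PySem.Set.contains_iff _ _).mp hc)
    rw [List.mem_map] at hmem
    obtain ⟨tv, hm, he⟩ := hmem
    have := List.any_eq_false.mp h tv hm
    simp [he] at this
  · apply (PySem.Set.contains_iff _ _).mpr
    rw [PySem.Set.mem_ofList, List.mem_map]
    obtain ⟨tv, hm, he⟩ := List.any_eq_true.mp h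
    exact ⟨tv, hm, by simpa using he⟩

theorem pv_any_iff_findIdx? (l : List (String × String)) (t : String) :
    l.any (fun tv => tv.1 == t) = (l.findIdx? (fun tv => tv.1 == t)).isSome := by
  cases h : l.findIdx? (fun tv => tv.1 == t) with
  | none =>
    have hn := List.findIdx?_eq_none_iff.mp h
    simp only [Option.isSome_none, List.any_eq_false]
    intro tv hm; simpa using hn tv hm
  | some i =>
    have hmem := List.findIdx?_eq_some_iff_getElem.mp h
    obtain ⟨hlt, hp, _⟩ := hmem
    simp only [Option.isSome_some, List.any_eq_true]
    exact ⟨l[i], List.getElem_mem hlt, hp⟩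

-- B's emitter, pending = false and mode ≠ 0: pure copy
theorem pv_emit_copy (chunk : List Char) (mode : Nat) (hm : mode ≠ 0)
    (l : List (String × String)) :
    emitGo chunk mode l false = (l.map pvFmt).flatten := by
  induction l with
  | nil => rfl
  | cons x xs ih =>
    rw [emitGo]
    rw [if_neg (by simp [hm]), if_neg (by simp), if_neg (by simp), ih]
    simp

-- B's emitter, mode 0: replaces every "54"
theorem pv_emit_replace (amt : String) (l : List (String × String)) :
    emitGo (pvAmountTag amt) 0 l false
      = ((l.map (fun tv => if tv.1 == "54" then ("54", amt) else tv)).map pvFmt).flatten := by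
  induction l with
  | nil => rfl
  | cons x xs ih =>
    rw [emitGo]
    by_cases h : (x.1 == "54") = true
    · rw [if_pos (by simp [h]), ih, List.map_cons, if_pos h, List.map_cons,
        List.flatten_cons, pvFmt54]
    · rw [if_neg (by simp [h]), if_neg (by simp), if_neg (by simp), ih, List.map_cons,
        if_neg h, List.map_cons, List.flatten_cons]

-- B's emitter, mode 3: append at the end
theorem pv_emit_append (chunk : List Char) (l : List (String × String)) :
    emitGo chunk 3 l true = (l.map pvFmt).flatten ++ chunk := by
  induction l with
  | nil => rfl
  | cons x xs ih =>
    rw [emitGo]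
    rw [if_neg (by simp), if_neg (by simp), if_neg (by simp), ih]
    simp

-- B's emitter, mode 1: insert after the first "53"
theorem pv_emit_53 (chunk : List Char) (l : List (String × String)) (i : Nat)
    (h : l.findIdx? (fun tv => tv.1 == "53") = some i) :
    emitGo chunk 1 l true
      = ((l.take (i+1)).map pvFmt).flatten ++ chunk ++ ((l.drop (i+1)).map pvFmt).flatten := by
  induction l generalizing i with
  | nil => simp at h
  | cons x xs ih =>
    rw [List.findIdx?_cons] at h
    rw [emitGo]
    by_cases hx : (x.1 == "53") = true
    · rw [if_pos hx] at h
      injection h with h; subst h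
      rw [if_neg (by simp), if_pos (by simp [hx]), pv_emit_copy _ _ (by omega)]
      simp
    · rw [if_neg hx] at h
      cases hfi : xs.findIdx? (fun tv => tv.1 == "53") with
      | none => rw [hfi] at h; simp at h
      | some j =>
        rw [hfi] at h; simp only [Option.map_some] at h
        injection h with h; subst h
        rw [if_neg (by simp), if_neg (by simp [hx]), if_neg (by simp), ih j hfi]
        simp [List.take_succ_cons, List.drop_succ_cons]

-- B's emitter, mode 2: insert before the first "58"
theorem pv_emit_58 (chunk : List Char) (l : List (String × String)) (i : Nat)
    (h : l.findIdx? (fun tv => tv.1 == "58") = some i) :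
    emitGo chunk 2 l true
      = ((l.take i).map pvFmt).flatten ++ chunk ++ ((l.drop i).map pvFmt).flatten := by
  induction l generalizing i with
  | nil => simp at h
  | cons x xs ih =>
    rw [List.findIdx?_cons] at h
    rw [emitGo]
    by_cases hx : (x.1 == "58") = true
    · rw [if_pos hx] at h
      injection h with h; subst h
      rw [if_neg (by simp), if_neg (by simp), if_pos (by simp [hx]), pv_emit_copy _ _ (by omega)]
      simp
    · rw [if_neg hx] at h
      cases hfi : xs.findIdx? (fun tv => tv.1 == "58") with
      | none => rw [hfi] at h; simp at h
      | some j =>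
        rw [hfi] at h; simp only [Option.map_some] at h
        injection h with h; subst h
        rw [if_neg (by simp), if_neg (by simp), if_neg (by simp [hx]), ih j hfi]
        simp [List.take_succ_cons, List.drop_succ_cons]

-- ===== VERDICT =====
theorem inject_or_replace_amount_spec : Claim_equal_inject_or_replace_amount := by
  intro payload amt _
  unfold Spec_inject_or_replace_amount inject_or_replace_amount inject_or_replace_amount_alt
  cases h : parseTLV payload with
  | none => rfl
  | some entries =>
    simp only [pv_loop54, List.nil_append, Bool.false_or, pv_contains_iff]
    by_cases hany : entries.any (fun tv => tv.1 == "54") = true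
    · simp only [hany, Bool.not_true, if_true, Bool.false_eq_true]
      rw [show ((0 : Nat) != 0) = false from rfl, pv_emit_replace,
        if_neg (by exact not_false), pv_buildTLV_eq]
    · simp only [Bool.not_eq_true] at hany
      rw [pv_map_id_of_no54 amt entries hany]
      simp only [hany, Bool.not_false, if_true, Bool.false_eq_true, if_false]
      rw [pv_loop53]
      cases h53 : entries.findIdx? (fun tv => tv.1 == "53") with
      | some i =>
        have hc53 : entries.any (fun tv => tv.1 == "53") = true := by
          rw [pv_any_iff_findIdx?, h53]; rfl
        simp only [hc53, if_true]
        rw [show ((1 : Nat) != 0) = true from rfl, pv_emit_53 _ _ i h53, pv_buildTLV_eq]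
        simp [pvFmt54]
      | none =>
        have hc53 : entries.any (fun tv => tv.1 == "53") = false := by
          rw [pv_any_iff_findIdx?, h53]; rfl
        simp only [hc53, Bool.not_false, if_true, Bool.false_eq_true, if_false]
        rw [pv_loop58]
        cases h58 : entries.findIdx? (fun tv => tv.1 == "58") with
        | some i =>
          have hc58 : entries.any (fun tv => tv.1 == "58") = true := by
            rw [pv_any_iff_findIdx?, h58]; rfl
          simp only [hc58, if_true]
          rw [show ((2 : Nat) != 0) = true from rfl, pv_emit_58 _ _ i h58, pv_buildTLV_eq]
          simp [pvFmt54]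
        | none =>
          have hc58 : entries.any (fun tv => tv.1 == "58") = false := by
            rw [pv_any_iff_findIdx?, h58]; rfl
          simp only [hc58, Bool.not_false, if_true, Bool.false_eq_true, if_false]
          rw [show ((3 : Nat) != 0) = true from rfl, pv_emit_append, pv_buildTLV_eq]
          simp [pvFmt54]
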